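-- pv_equiv track=rewrite | github.com/yipeizhao/leetcode_solutions | 506Relative Ranks.py | solution
-- ===== SOURCE A (Python) =====
-- def solution(score):
--     rank = list(reversed(sorted(score)))
--     for i in range(len(score)):
--         score[i]=rank.index(score[i])
--         if score[i]==0:
--             score[i] = 'Gold Medal'
--         elif score[i]==1:
--             score[i] = 'Silver Medal'
--         elif score[i] ==2:
--             score[i] = 'Bronze Medal'
--         else:
--             score[i]+=1
--             score[i]=str(score[i])
--     return score
-- ===== SOURCE B (Python) =====
-- def solution(score):
--     # rank of v = number of scores strictly greater than v (no sorting at all)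
--     ranks = [sum(1 for y in score if y > v) for v in score]
--     labels = ['Gold Medal', 'Silver Medal', 'Bronze Medal']
--     for i, r in enumerate(ranks):
--         score[i] = labels[r] if r < 3 else str(r + 1)
--     return score
-- ===== Notes on version B (the rewrite author's own statement) =====
-- stated objective: alternative
-- what changed: Drops A's sort-then-list.index strategy entirely: B computes each rank directly as the count of strictly greater scores (pure comparison counting, no sorted list), then writes the labels in a second pass.
import Mathlib
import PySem

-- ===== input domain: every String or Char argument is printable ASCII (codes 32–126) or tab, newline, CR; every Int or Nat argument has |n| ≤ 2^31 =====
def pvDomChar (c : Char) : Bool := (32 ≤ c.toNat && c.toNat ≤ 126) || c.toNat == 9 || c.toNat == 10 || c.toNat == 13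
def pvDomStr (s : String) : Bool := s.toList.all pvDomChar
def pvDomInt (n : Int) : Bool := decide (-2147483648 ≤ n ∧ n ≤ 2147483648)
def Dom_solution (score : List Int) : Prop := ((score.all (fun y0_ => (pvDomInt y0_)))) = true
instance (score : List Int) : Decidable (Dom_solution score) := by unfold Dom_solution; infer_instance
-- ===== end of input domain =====

-- B drops A's sort-then-index strategy: each rank is computed directly as the count of strictly
-- greater scores (comparison counting, no sorted list). Both A and B mutate the argument list in
-- place in Python; the equivalence proved here is about the return value.


-- ===== PORT A =====
-- the in-place loop: element i is read (still the original score) and immediately replaced,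
-- so it is transcribed as a left-to-right pass producing the string for each original element.
-- rank.index(v) always succeeds here (v ∈ rank), so the ValueError branch is unreachable; .getD 0 marks it.
def solutionGoA (rank : List Int) : List Int → List String
  | [] => []
  | x :: xs =>
    let r : Nat := (PySem.List.index? rank x).getD 0
    (if r = 0 then "Gold Medal"
     else if r = 1 then "Silver Medal"
     else if r = 2 then "Bronze Medal"
     else PySem.Int.toStr ((r : Int) + 1)) :: solutionGoA rank xs

def solution (score : List Int) : List String :=
  let rank := (PySem.List.sorted score (fun x => x) false).reverse
  solutionGoA rank score

-- ===== PORT B =====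
def solution_alt (score : List Int) : List String :=
  -- ranks[i] = sum(1 for y in score if y > score[i])
  let ranks : List Int := score.map (fun v =>
    score.foldl (fun acc y => if v < y then acc + 1 else acc) 0)
  let labels : List String := ["Gold Medal", "Silver Medal", "Bronze Medal"]
  -- labels[r] is evaluated only when 0 ≤ r < 3, so the IndexError is unreachable; .getD "" marks it
  ranks.map (fun r =>
    if r < 3 then (PySem.List.pyGet? labels r).getD "" else PySem.Int.toStr (r + 1))

-- ===== PRECONDITION & SPEC =====
def Spec_solution (score : List Int) (out : List String) : Prop := out = solution_alt score
instance (score : List Int) (out : List String) : Decidable (Spec_solution score out) := by unfold Spec_solution; infer_instance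

-- ===== CLAIM (what is proved, stated in full; the proofs are below) =====
def Claim_equal_solution : Prop := ∀ (score : List Int), Dom_solution score → Spec_solution score (solution score)

-- ===== LEMMAS AND PROOFS =====

-- reversed(sorted(score)) is exactly sorted(score, reverse=True) for an identity key
lemma sortedRevEq (score : List Int) :
    PySem.List.sorted score (fun x => x) true
      = (PySem.List.sorted score (fun x => x) false).reverse := by
  have h : (PySem.List.sorted score (fun x => x) true).reverse
      = PySem.List.sorted score (fun x => x) false := by
    apply PySem.List.eq_of_perm_of_pairwise_le_of_injective (fun x => x)
      (fun a b h => h)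
    · exact (List.reverse_perm _).trans
        ((PySem.List.sorted_perm score (fun x => x) true).trans
          (PySem.List.sorted_perm score (fun x => x) false).symm)
    · rw [List.pairwise_reverse]
      exact PySem.List.sorted_pairwise_rev score (fun x => x)
    · exact PySem.List.sorted_pairwise score (fun x => x)
  calc PySem.List.sorted score (fun x => x) true
      = (PySem.List.sorted score (fun x => x) true).reverse.reverse := by
        rw [List.reverse_reverse]
    _ = (PySem.List.sorted score (fun x => x) false).reverse := by rw [h]

-- in a descending list, the first index of v is the number of elements strictly greater than v
lemma index?_desc_eq_countP (l : List Int) (v : Int)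
    (hs : l.Pairwise (fun a b => b ≤ a)) (hv : v ∈ l) :
    PySem.List.index? l v = some (l.countP (fun y => decide (v < y))) := by
  induction l with
  | nil => cases hv
  | cons a xs ih =>
    rcases List.pairwise_cons.1 hs with ⟨hall, htail⟩
    by_cases hva : a = v
    · subst hva
      rw [PySem.List.index?_cons_self]
      have h0 : xs.countP (fun y => decide (a < y)) = 0 := by
        apply List.countP_eq_zero.2
        intro y hy
        simp only [decide_eq_true_eq, not_lt]
        exact hall y hy
      simp [h0]
    · have hvxs : v ∈ xs := by
        rcases List.mem_cons.1 hv with h | h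
        · exact absurd h.symm hva
        · exact h
      rw [PySem.List.index?_cons_of_ne xs hva, ih htail hvxs]
      have hlt : v < a := lt_of_le_of_ne (hall v hvxs) (fun e => hva e.symm)
      simp [hlt]

lemma solutionGoA_eq_map (rank : List Int) (xs : List Int) :
    solutionGoA rank xs = xs.map (fun x =>
      let r : Nat := (PySem.List.index? rank x).getD 0
      if r = 0 then "Gold Medal"
      else if r = 1 then "Silver Medal"
      else if r = 2 then "Bronze Medal"
      else PySem.Int.toStr ((r : Int) + 1)) := by
  induction xs with
  | nil => rfl
  | cons x xs ih => simp [solutionGoA, ih]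

theorem solution_spec : Claim_equal_solution := by
  intro score _
  unfold Spec_solution solution solution_alt
  rw [solutionGoA_eq_map, List.map_map]
  apply List.map_congr_left
  intro x hx
  have hmem : x ∈ PySem.List.sorted score (fun x => x) true :=
    (PySem.List.sorted_perm score (fun x => x) true).mem_iff.2 hx
  have hrank : PySem.List.index? ((PySem.List.sorted score (fun x => x) false).reverse) x
      = some ((PySem.List.sorted score (fun x => x) true).countP (fun y => decide (x < y))) := by
    rw [← sortedRevEq]
    exact index?_desc_eq_countP _ x (PySem.List.sorted_pairwise_rev score (fun x => x)) hmem
  have hcnt : (PySem.List.sorted score (fun x => x) true).countP (fun y => decide (x < y))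
      = score.countP (fun y => decide (x < y)) :=
    (PySem.List.sorted_perm score (fun x => x) true).countP_eq _
  have hfold : score.foldl (fun acc y => if x < y then acc + 1 else acc) (0 : Int)
      = (score.countP (fun y => decide (x < y)) : Int) := by
    rw [PySem.List.foldl_ite_add_one]
    simp
  generalize hc : score.countP (fun y => decide (x < y)) = c at hcnt hfold
  simp only [Function.comp, hrank, hcnt, hfold, Option.getD_some]
  by_cases h0 : c = 0
  · subst h0; norm_num [PySem.List.pyGet?, PySem.List.pyIdx?]
  by_cases h1 : c = 1
  · subst h1; norm_num [PySem.List.pyGet?, PySem.List.pyIdx?]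
  by_cases h2 : c = 2
  · subst h2; norm_num [PySem.List.pyGet?, PySem.List.pyIdx?]; all_goals decide
  have hge : ¬ ((c : Int) < 3) := by omega
  simp [h0, h1, h2, hge]

-- ===== VERDICT (by name: the statement is the Claim_ definition above) =====
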